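-- pv_equiv track=rewrite | github.com/MrYadro/Dota2Results | _pickban.py | series_text_maker
-- ===== SOURCE A (Python) =====
-- def series_text_maker(series_type, score, side):
--     if series_type == 0:
--         text = '⬜'
--     if series_type == 1:
--         text = '⬜⬜'
--     if series_type == 2:
--         text = '⬜⬜⬜'
--     for i in range(0, score):
--         text = text[:i] + '⬛' + text[i+1:]
--     if side == 'radiant':
--         return text[::-1]
--     else:
--         return text
-- ===== SOURCE B (Python) =====
-- def series_text_maker(series_type, score, side):
--     if series_type == 0:
--         n = 1
--     elif series_type == 1:
--         n = 2
--     elif series_type == 2: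
--         n = 3
--     black = max(0, score)
--     text = '⬛' * black + '⬜' * max(0, n - black)
--     return text[::-1] if side == 'radiant' else text
-- ===== Notes on version B (the rewrite author's own statement) =====
-- stated objective: simpler
-- what changed: Replaces the per-index slice-and-rebuild replacement loop with a direct closed-form construction (max(0,score) black squares then the remaining white squares); Pre_ excludes series_type outside {0,1,2}, where A (and B alike) raises UnboundLocalError.
import Mathlib
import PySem

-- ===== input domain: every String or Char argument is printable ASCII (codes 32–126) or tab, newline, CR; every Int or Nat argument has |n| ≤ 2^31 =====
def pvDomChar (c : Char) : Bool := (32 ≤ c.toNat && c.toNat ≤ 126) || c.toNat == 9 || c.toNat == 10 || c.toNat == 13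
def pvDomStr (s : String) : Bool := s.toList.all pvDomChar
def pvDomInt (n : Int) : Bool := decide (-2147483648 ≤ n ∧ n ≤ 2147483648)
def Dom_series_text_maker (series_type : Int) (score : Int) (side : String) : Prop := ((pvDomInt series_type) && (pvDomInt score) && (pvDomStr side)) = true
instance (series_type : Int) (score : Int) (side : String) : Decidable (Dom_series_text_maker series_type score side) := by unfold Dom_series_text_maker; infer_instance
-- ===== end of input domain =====

-- B builds the result directly (blacks then whites, closed form) instead of A's per-index
-- slice-and-rebuild loop; return value only, no mutation involved.

-- ===== PORT A =====
-- literal port of A; the loop body is text = text[:i] + '⬛' + text[i+1:] (PySem slices);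
-- text carried as List Char, turned into String on return ('⬜' outside Pre_ is unreachable: A raises there)
def series_text_maker (series_type : Int) (score : Int) (side : String) : String :=
  let text : List Char :=
    if series_type == 0 then "⬜".toList
    else if series_type == 1 then "⬜⬜".toList
    else if series_type == 2 then "⬜⬜⬜".toList
    else []
  let text := (PySem.List.pyRange 0 score 1).foldl
    (fun t i => PySem.List.slice t none (some i) ++ '⬛' :: PySem.List.slice t (some (i + 1)) none) text
  if side == "radiant" then String.mk text.reverse   -- text[::-1] (PySem.Str.slice?_none_none_neg_one)
  else String.mk text

-- ===== PORT B =====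
def series_text_maker_alt (series_type : Int) (score : Int) (side : String) : String :=
  let n : Int :=
    if series_type == 0 then 1
    else if series_type == 1 then 2
    else if series_type == 2 then 3
    else 0
  let black : Int := max 0 score
  let text : List Char := List.replicate black.toNat '⬛' ++ List.replicate (max 0 (n - black)).toNat '⬜'
  if side == "radiant" then String.mk text.reverse else String.mk text

-- ===== PRECONDITION & SPEC =====
-- Pre_ excludes exactly the series_type values on which Python A raises UnboundLocalError ('text' never assigned)
def Pre_series_text_maker (series_type : Int) (score : Int) (side : String) : Prop :=
  series_type = 0 ∨ series_type = 1 ∨ series_type = 2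
instance (series_type : Int) (score : Int) (side : String) : Decidable (Pre_series_text_maker series_type score side) := by unfold Pre_series_text_maker; infer_instance
def pvWitness_series_text_maker : Int × Int × String := (1, 1, "radiant")

def Spec_series_text_maker (series_type : Int) (score : Int) (side : String) (out : String) : Prop := out = series_text_maker_alt series_type score side
instance (series_type : Int) (score : Int) (side : String) (out : String) : Decidable (Spec_series_text_maker series_type score side out) := by unfold Spec_series_text_maker; infer_instance

-- ===== CLAIM (what is proved, stated in full; the proofs are below) =====
def Claim_equal_series_text_maker : Prop := ∀ (series_type : Int) (score : Int) (side : String), Dom_series_text_maker series_type score side → Pre_series_text_maker series_type score side → Spec_series_text_maker series_type score side (series_text_maker series_type score side)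

-- ===== LEMMAS AND PROOFS =====

-- one iteration of A's loop at index s, applied to s blacks then m whites
theorem step_repl (s m : Nat) :
    (PySem.List.slice (List.replicate s '⬛' ++ List.replicate m '⬜') none (some (s : Int)) ++
      '⬛' :: PySem.List.slice (List.replicate s '⬛' ++ List.replicate m '⬜') (some ((s : Int) + 1)) none)
    = List.replicate (s + 1) '⬛' ++ List.replicate (m - 1) '⬜' := by
  have h1 : ((s : Int) + 1) = ((s + 1 : Nat) : Int) := by push_cast; ring
  rw [h1, PySem.List.slice_to_natCast, PySem.List.slice_from_natCast]
  have htake : (List.replicate s '⬛' ++ List.replicate m '⬜').take s = List.replicate s '⬛' := by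
    simpa using List.take_left (l₁ := List.replicate s '⬛') (l₂ := List.replicate m '⬜')
  have hdrop : (List.replicate s '⬛' ++ List.replicate m '⬜').drop (s + 1)
      = List.replicate (m - 1) '⬜' := by
    rw [← List.drop_drop]
    simp [List.drop_replicate]
  rw [htake, hdrop, List.replicate_succ']
  simp

-- A's whole loop starting from n whites yields s blacks followed by n-s whites
theorem loop_repl (s n : Nat) :
    (List.range s).foldl
      (fun t (k : Nat) =>
        PySem.List.slice t none (some (k : Int)) ++ '⬛' :: PySem.List.slice t (some ((k : Int) + 1)) none)
      (List.replicate n '⬜')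
    = List.replicate s '⬛' ++ List.replicate (n - s) '⬜' := by
  induction s with
  | zero => simp
  | succ s ih =>
    rw [List.range_succ, List.foldl_append, ih]
    simp only [List.foldl_cons, List.foldl_nil]
    rw [step_repl, Nat.sub_sub]

-- A's loop over pyRange 0 score equals the closed form, for any Int score
theorem loop_pyRange (score : Int) (n : Nat) :
    (PySem.List.pyRange 0 score 1).foldl
      (fun t i => PySem.List.slice t none (some i) ++ '⬛' :: PySem.List.slice t (some (i + 1)) none)
      (List.replicate n '⬜')
    = List.replicate score.toNat '⬛' ++ List.replicate (n - score.toNat) '⬜' := by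
  rw [PySem.List.pyRange_one, List.foldl_map]
  simpa using loop_repl (score - 0).toNat n

-- ===== VERDICT (by name: the statement is the Claim_ definition above) =====
theorem series_text_maker_spec : Claim_equal_series_text_maker := by
  intro st score side _ hpre
  show _ = _
  have key : ∀ n : Nat, List.replicate score.toNat '⬛' ++ List.replicate (n - score.toNat) '⬜'
      = List.replicate (max 0 score).toNat '⬛' ++ List.replicate (max 0 ((n : Int) - max 0 score)).toNat '⬜' := by
    intro n
    have h1 : score.toNat = (max 0 score).toNat := by omega
    have h2 : n - score.toNat = (max 0 ((n : Int) - max 0 score)).toNat := by omega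
    rw [← h1, ← h2]
  rcases hpre with h | h | h <;> subst h <;>
    simp only [series_text_maker, series_text_maker_alt] <;> norm_num
  · rw [show ("⬜".toList : List Char) = List.replicate 1 '⬜' from rfl, loop_pyRange]
    have := key 1; push_cast at this; rw [this]
    split_ifs <;> simp [List.reverse_append]
  · rw [show ("⬜⬜".toList : List Char) = List.replicate 2 '⬜' from rfl, loop_pyRange]
    have := key 2; push_cast at this; rw [this]
    split_ifs <;> simp [List.reverse_append]
  · rw [show ("⬜⬜⬜".toList : List Char) = List.replicate 3 '⬜' from rfl, loop_pyRange]
    have := key 3; push_cast at this; rw [this]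
    split_ifs <;> simp [List.reverse_append]
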